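-- pv_equiv track=rewrite | github.com/talevski14/robomac-2024-ai-football | AI Football/src/Test_team/Manager.py | find_goalkeeper
-- ===== SOURCE A (Python) =====
-- def find_goalkeeper(their_team, our_side):
--     goalkeeper = their_team[0]
--     position = goalkeeper["x"]
--
--     if our_side == "left":
--         for player in their_team:
--             if player["x"] >= position:
--                 position = player["x"]
--                 goalkeeper = player
--     else:
--         for player in their_team:
--             if player["x"] < position:
--                 position = player["x"]
--                 goalkeeper = player
--
--     return goalkeeper
-- ===== SOURCE B (Python) =====
-- def find_goalkeeper(their_team, our_side):
--     s = sorted(their_team, key=lambda p: p["x"])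
--     return s[-1] if our_side == "left" else s[0]
-- ===== Notes on version B (the rewrite author's own statement) =====
-- stated objective: alternative
-- what changed: The two running-extremum accumulator loops are replaced by one stable sort on x followed by endpoint selection (s[-1] reproduces the left branch's last-maximum >= rule, s[0] the first-minimum < rule).
import Mathlib
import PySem

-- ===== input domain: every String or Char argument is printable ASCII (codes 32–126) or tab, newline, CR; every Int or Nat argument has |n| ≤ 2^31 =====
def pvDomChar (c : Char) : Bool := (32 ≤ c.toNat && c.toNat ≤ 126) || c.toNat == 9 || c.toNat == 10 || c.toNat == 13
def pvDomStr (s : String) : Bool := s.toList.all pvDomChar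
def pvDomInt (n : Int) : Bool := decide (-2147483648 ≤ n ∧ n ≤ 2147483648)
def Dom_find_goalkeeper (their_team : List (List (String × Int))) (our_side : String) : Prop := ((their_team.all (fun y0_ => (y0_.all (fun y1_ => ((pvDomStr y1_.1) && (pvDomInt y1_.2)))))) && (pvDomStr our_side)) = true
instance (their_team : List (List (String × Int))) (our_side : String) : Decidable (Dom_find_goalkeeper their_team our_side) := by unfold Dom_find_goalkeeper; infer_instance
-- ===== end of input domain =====

-- B replaces A's two running-extremum loops by one stable sort on x plus endpoint selection
-- (s[-1] = last maximum, matching A's '>=' rule; s[0] = first minimum, matching A's '<' rule).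

-- shared key: player["x"] (Pre_ guarantees the key is present, so the getD default is never read)
def pvKey (p : List (String × Int)) : Int := PySem.Dict.getD ⟨p⟩ "x" 0

-- ===== PORT A =====
-- the loop body of A's left branch: 'if player["x"] >= position: position, goalkeeper = …'
def pvStepL (st : (List (String × Int)) × Int) (player : List (String × Int)) :
    (List (String × Int)) × Int :=
  if pvKey player ≥ st.2 then (player, pvKey player) else st

-- the loop body of A's else branch: 'if player["x"] < position: …'
def pvStepR (st : (List (String × Int)) × Int) (player : List (String × Int)) :
    (List (String × Int)) × Int :=
  if pvKey player < st.2 then (player, pvKey player) else st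

def find_goalkeeper (their_team : List (List (String × Int))) (our_side : String) : List (String × Int) :=
  match their_team with
  | [] => []   -- their_team[0] raises IndexError; excluded by Pre_
  | g0 :: rest =>
    if our_side == "left" then
      ((g0 :: rest).foldl pvStepL (g0, pvKey g0)).1
    else
      ((g0 :: rest).foldl pvStepR (g0, pvKey g0)).1

-- ===== PORT B =====
def find_goalkeeper_alt (their_team : List (List (String × Int))) (our_side : String) : List (String × Int) :=
  let s := PySem.List.sorted their_team pvKey
  if our_side == "left" then (PySem.List.pyGet? s (-1)).getD []
  else (PySem.List.pyGet? s 0).getD []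

-- ===== PRECONDITION & SPEC =====
-- Pre_ excludes exactly where Python A raises: the empty team (IndexError on their_team[0])
-- and any player without an "x" key (KeyError on player["x"]).
def Pre_find_goalkeeper (their_team : List (List (String × Int))) (our_side : String) : Prop :=
  their_team ≠ [] ∧ ∀ p ∈ their_team, (PySem.Dict.get? (⟨p⟩ : PySem.Dict String Int) "x").isSome = true
instance (their_team : List (List (String × Int))) (our_side : String) : Decidable (Pre_find_goalkeeper their_team our_side) := by unfold Pre_find_goalkeeper; infer_instance

def pvWitness_find_goalkeeper : (List (List (String × Int))) × String := ([[("x", 3)], [("x", 3), ("y", 1)]], "left")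

def Spec_find_goalkeeper (their_team : List (List (String × Int))) (our_side : String) (out : List (String × Int)) : Prop := out = find_goalkeeper_alt their_team our_side
instance (their_team : List (List (String × Int))) (our_side : String) (out : List (String × Int)) : Decidable (Spec_find_goalkeeper their_team our_side out) := by unfold Spec_find_goalkeeper; infer_instance

-- ===== CLAIM (what is proved, stated in full; the proofs are below) =====
def Claim_equal_find_goalkeeper : Prop := ∀ (their_team : List (List (String × Int))) (our_side : String), Dom_find_goalkeeper their_team our_side → Pre_find_goalkeeper their_team our_side → Spec_find_goalkeeper their_team our_side (find_goalkeeper their_team our_side)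

-- ===== LEMMAS AND PROOFS =====

-- the comparator Python's sort uses for key pvKey
def pvBef (a b : List (String × Int)) : Bool := decide (pvKey a < pvKey b)

-- one more element into the insertion sort
lemma pv_sorted_concat (l : List (List (String × Int))) (x : List (String × Int)) :
    PySem.List.sorted (l ++ [x]) pvKey =
      PySem.List.insertBy pvBef x (PySem.List.sorted l pvKey) := by
  rw [PySem.List.sorted_eq_foldl_insertBy, PySem.List.sorted_eq_foldl_insertBy,
    List.foldl_append]
  rfl

-- inserting an element that compares before the last element keeps the last element
lemma pv_getLast?_insertBy_of_bef {α : Type} (bef : α → α → Bool) (x : α) :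
    ∀ (s : List α) (m : α), s.getLast? = some m → bef x m = true →
      (PySem.List.insertBy bef x s).getLast? = some m := by
  intro s
  induction s with
  | nil => intro m hm _; simp at hm
  | cons y ys ih =>
    intro m hm hx
    by_cases hb : bef x y = true
    · have : PySem.List.insertBy bef x (y :: ys) = x :: y :: ys := by
        simp [PySem.List.insertBy, hb]
      rw [this, List.getLast?_cons_cons]
      exact hm
    · have hstep : PySem.List.insertBy bef x (y :: ys) = y :: PySem.List.insertBy bef x ys := by
        simp [PySem.List.insertBy, hb]
      rw [hstep]
      cases ys with
      | nil =>
        simp at hm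
        subst hm
        simp_all
      | cons z zs =>
        rw [List.getLast?_cons_cons] at hm
        have hrec := ih m hm hx
        have hne : PySem.List.insertBy bef x (z :: zs) ≠ [] := by
          intro hnil
          have : m ∈ PySem.List.insertBy bef x (z :: zs) := by
            rw [PySem.List.mem_insertBy]
            right
            exact List.mem_of_getLast? hm
          simp [hnil] at this
        cases hI : PySem.List.insertBy bef x (z :: zs) with
        | nil => exact absurd hI hne
        | cons w ws =>
          rw [List.getLast?_cons_cons]
          rw [hI] at hrec
          exact hrec

-- in a ≤-pairwise list every element's key is ≤ the last element's key
lemma pv_pairwise_le_getLast :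
    ∀ (s : List (List (String × Int))), s.Pairwise (fun a b => pvKey a ≤ pvKey b) →
      ∀ (m : List (String × Int)), s.getLast? = some m → ∀ y ∈ s, pvKey y ≤ pvKey m := by
  intro s
  induction s with
  | nil => intro _ m hm; simp at hm
  | cons a t ih =>
    intro hp m hm y hy
    rcases List.pairwise_cons.mp hp with ⟨ha, ht⟩
    cases t with
    | nil =>
      simp at hm hy
      subst hm; subst hy
      exact le_refl _
    | cons z zs =>
      rw [List.getLast?_cons_cons] at hm
      rcases List.mem_cons.mp hy with rfl | hy'
      · exact ha m (List.mem_of_getLast? hm)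
      · exact ih ht m hm y hy'

-- LEFT branch invariant: the fold with '>=' computes the LAST element of the stable sort
lemma pv_left_inv (t : List (List (String × Int))) (g : List (String × Int)) :
    (PySem.List.sorted (g :: t) pvKey).getLast? = some (t.foldl pvStepL (g, pvKey g)).1
      ∧ (t.foldl pvStepL (g, pvKey g)).2 = pvKey (t.foldl pvStepL (g, pvKey g)).1 := by
  induction t using List.reverseRecOn with
  | nil =>
    constructor
    · rw [PySem.List.sorted_eq_foldl_insertBy]; rfl
    · rfl
  | append_singleton t x ih =>
    obtain ⟨hlast, hkey⟩ := ih
    rw [List.foldl_append]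
    have hs : PySem.List.sorted (g :: (t ++ [x])) pvKey
        = PySem.List.insertBy pvBef x (PySem.List.sorted (g :: t) pvKey) := by
      have := pv_sorted_concat (g :: t) x
      simpa using this
    rw [hs]
    simp only [List.foldl]
    set r := t.foldl pvStepL (g, pvKey g) with hr
    by_cases hc : pvKey x ≥ r.2
    · have hstepx : pvStepL r x = (x, pvKey x) := by unfold pvStepL; rw [if_pos hc]
      rw [hstepx]
      have hall : ∀ y ∈ PySem.List.sorted (g :: t) pvKey, pvBef x y = false := by
        intro y hy
        have hle : pvKey y ≤ pvKey r.1 :=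
          pv_pairwise_le_getLast _ (PySem.List.sorted_pairwise _ _) _ hlast y hy
        simp only [pvBef, decide_eq_false_iff_not, not_lt]
        omega
      rw [PySem.List.insertBy_of_forall_not_before _ _ _ hall]
      exact ⟨List.getLast?_concat, rfl⟩
    · have hb : pvBef x r.1 = true := by
        simp only [pvBef, decide_eq_true_eq]
        omega
      have hstepx : pvStepL r x = r := by unfold pvStepL; rw [if_neg hc]
      rw [hstepx]
      exact ⟨pv_getLast?_insertBy_of_bef pvBef x _ _ hlast hb, hkey⟩

-- RIGHT branch invariant: the fold with '<' computes the FIRST element of the stable sort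
lemma pv_right_inv (t : List (List (String × Int))) (g : List (String × Int)) :
    (PySem.List.sorted (g :: t) pvKey).head? = some (t.foldl pvStepR (g, pvKey g)).1
      ∧ (t.foldl pvStepR (g, pvKey g)).2 = pvKey (t.foldl pvStepR (g, pvKey g)).1 := by
  induction t using List.reverseRecOn with
  | nil =>
    constructor
    · rw [PySem.List.sorted_eq_foldl_insertBy]; rfl
    · rfl
  | append_singleton t x ih =>
    obtain ⟨hhead, hkey⟩ := ih
    rw [List.foldl_append]
    have hs : PySem.List.sorted (g :: (t ++ [x])) pvKey
        = PySem.List.insertBy pvBef x (PySem.List.sorted (g :: t) pvKey) := by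
      have := pv_sorted_concat (g :: t) x
      simpa using this
    rw [hs]
    simp only [List.foldl]
    set r := t.foldl pvStepR (g, pvKey g) with hr
    cases hS : PySem.List.sorted (g :: t) pvKey with
    | nil => simp [hS] at hhead
    | cons y ys =>
      rw [hS] at hhead
      have hy : y = r.1 := by simpa using hhead
      by_cases hc : pvKey x < r.2
      · have hb : pvBef x y = true := by
          simp only [pvBef, decide_eq_true_eq, hy]
          omega
        simp [PySem.List.insertBy, hb, pvStepR, hc]
      · have hb : pvBef x y = false := by
          simp only [pvBef, decide_eq_false_iff_not, not_lt, hy]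
          omega
        subst hy
        have hstepx : pvStepR r x = r := by unfold pvStepR; rw [if_neg hc]
        rw [hstepx]
        exact ⟨by simp [PySem.List.insertBy, hb], hkey⟩

-- python s[-1] on a nonempty list is its last element
lemma pv_pyGet_neg_one {α : Type} (s : List α) (h : s ≠ []) :
    PySem.List.pyGet? s (-1) = s.getLast? := by
  have hlen : 0 < s.length := List.length_pos_iff.mpr h
  simp only [PySem.List.pyGet?, PySem.List.pyIdx?]
  rw [if_neg (by norm_num), if_pos (by omega : -(s.length : Int) ≤ -1)]
  have h1 : (-(-1 : Int)).toNat = 1 := by norm_num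
  rw [h1]; simp only [Option.bind_some]
  rw [List.getLast?_eq_getElem?]

-- python s[0] is the head
lemma pv_pyGet_zero {α : Type} (s : List α) :
    PySem.List.pyGet? s 0 = s.head? := by
  simp [PySem.List.pyGet?, PySem.List.pyIdx?]
  cases s <;> simp

-- ===== VERDICT (by name: the statement is the Claim_ definition above) =====
theorem find_goalkeeper_spec : Claim_equal_find_goalkeeper := by
  intro their_team our_side _ hpre
  obtain ⟨hne, _⟩ := hpre
  cases their_team with
  | nil => exact absurd rfl hne
  | cons g0 rest =>
    have hsne : PySem.List.sorted (g0 :: rest) pvKey ≠ [] := by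
      intro h
      exact (List.cons_ne_nil g0 rest) ((PySem.List.sorted_eq_nil_iff _ _ _).mp h)
    simp only [Spec_find_goalkeeper, find_goalkeeper, find_goalkeeper_alt]
    by_cases hside : (our_side == "left") = true
    · rw [if_pos hside, if_pos hside]
      have hstep : pvStepL (g0, pvKey g0) g0 = (g0, pvKey g0) := by
        unfold pvStepL; rw [if_pos (le_refl _)]
      rw [List.foldl_cons, hstep, pv_pyGet_neg_one _ hsne, (pv_left_inv rest g0).1]
      rfl
    · rw [if_neg hside, if_neg hside]
      have hstep : pvStepR (g0, pvKey g0) g0 = (g0, pvKey g0) := by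
        unfold pvStepR; rw [if_neg (lt_irrefl _)]
      rw [List.foldl_cons, hstep, pv_pyGet_zero, (pv_right_inv rest g0).1]
      rfl
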